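-- pv_equiv track=rewrite | github.com/tsani/coding-cat-public | same-adjacent/solution.py | same_adjacent
-- ===== SOURCE A (Python) =====
-- def same_adjacent(str, char):
--     '''
--         Correct implementation
--     '''
--     count = 0
--     adjacent = False
--     for i in range(len(str)):
--         if str[i] == char:
--             count += 1
--             if i > 0 and str[i-1] == char:
--                 adjacent = True
--     return count if adjacent else 0
-- ===== SOURCE B (Python) =====
-- def same_adjacent(str, char):
--     # Run-length encode the string, then read count and adjacency off the runs.
--     runs = []
--     i = 0
--     while i < len(str):
--         j = i + 1
--         while j < len(str) and str[j] == str[i]: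
--             j += 1
--         runs.append((str[i], j - i))
--         i = j
--     count = sum(n for c, n in runs if c == char)
--     adjacent = any(c == char and n >= 2 for c, n in runs)
--     return count if adjacent else 0
-- ===== Notes on version B (the rewrite author's own statement) =====
-- stated objective: alternative
-- what changed: A makes one stateful index scan, counting matches and flagging when a match directly follows a match; B first run-length-encodes the string into (char, length) runs and then reads the count (sum of matching run lengths) and adjacency (some matching run of length >= 2) off the run list.
import Mathlib
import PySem

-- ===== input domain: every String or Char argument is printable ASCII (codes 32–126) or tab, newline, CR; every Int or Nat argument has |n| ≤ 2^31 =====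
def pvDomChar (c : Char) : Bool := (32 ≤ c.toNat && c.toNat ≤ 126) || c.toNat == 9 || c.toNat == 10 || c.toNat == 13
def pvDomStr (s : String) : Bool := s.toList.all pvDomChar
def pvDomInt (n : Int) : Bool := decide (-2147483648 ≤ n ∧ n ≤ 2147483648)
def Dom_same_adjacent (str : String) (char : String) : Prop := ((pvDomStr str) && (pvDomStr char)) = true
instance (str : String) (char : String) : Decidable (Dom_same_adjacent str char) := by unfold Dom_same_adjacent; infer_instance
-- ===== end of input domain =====

-- B run-length-encodes the string and reads count/adjacency off the runs (alternative decomposition, same cost).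

-- ===== PORT A =====
-- one stateful pass: count matches and flag when a match directly follows a match
def same_adjacent (str : String) (char : String) : Int :=
  let cs := str.toList
  let cc := char.toList
  let st := (PySem.List.pyRange 0 (PySem.Str.len str) 1).foldl
    (fun (s : Int × Bool) i =>
      if ([PySem.List.pyGetD cs i ' '] == cc) then
        (s.1 + 1, if (decide ((0:Int) < i) && ([PySem.List.pyGetD cs (i-1) ' '] == cc)) then true else s.2)
      else s) ((0 : Int), false)
  if st.2 then st.1 else 0

-- ===== PORT B =====
-- run-length encode: the inner while loop counts the consecutive equal characters (takeWhile),
-- the outer while loop continues after the run (dropWhile)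
def rle : List Char → List (Char × Int)
  | [] => []
  | c :: cs =>
    (c, 1 + ((cs.takeWhile (· == c)).length : Int)) :: rle (cs.dropWhile (· == c))
termination_by l => l.length
decreasing_by
  simpa using Nat.lt_succ_of_le (List.length_dropWhile_le _ _)

def same_adjacent_alt (str : String) (char : String) : Int :=
  let cc := char.toList
  let runs := rle str.toList
  let count := runs.foldl (fun a q => if [q.1] == cc then a + q.2 else a) 0
  let adjacent := runs.any (fun q => [q.1] == cc && decide ((2:Int) ≤ q.2))
  if adjacent then count else 0

-- ===== PRECONDITION & SPEC =====
def Spec_same_adjacent (str : String) (char : String) (out : Int) : Prop := out = same_adjacent_alt str char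
instance (str : String) (char : String) (out : Int) : Decidable (Spec_same_adjacent str char out) := by unfold Spec_same_adjacent; infer_instance

-- ===== CLAIM (what is proved, stated in full; the proofs are below) =====
def Claim_equal_same_adjacent : Prop := ∀ (str : String) (char : String), Dom_same_adjacent str char → Spec_same_adjacent str char (same_adjacent str char)

-- ===== LEMMAS AND PROOFS =====

-- adjacency of a char list under a predicate: some adjacent pair both satisfying p
def pairAny (p : Char → Bool) (l : List Char) : Bool :=
  (l.zip l.tail).any (fun q => p q.1 && p q.2)

-- A's loop computes (count of matches, flag ∨ ∃ i in l matching at i and i-1)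
theorem foldA (pp : Int → Bool) (l : List Int) (c0 : Int) (a0 : Bool) :
    l.foldl (fun (s : Int × Bool) i =>
      if pp i then (s.1 + 1, if (decide ((0:Int) < i) && pp (i-1)) then true else s.2) else s) (c0, a0)
    = (c0 + l.countP pp, a0 || l.any (fun i => pp i && (decide ((0:Int) < i) && pp (i-1)))) := by
  induction l generalizing c0 a0 with
  | nil => simp
  | cons a t ih =>
    simp only [List.foldl_cons, List.countP_cons, List.any_cons]
    by_cases h : pp a = true
    · simp only [h, if_true, Bool.true_and]
      rw [ih]
      simp only [Prod.mk.injEq]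
      refine ⟨by push_cast; ring, ?_⟩
      by_cases h2 : (decide ((0:Int) < a) && pp (a-1)) = true
      · simp [h2]
      · simp only [Bool.not_eq_true] at h2
        simp [h2]
    · simp only [Bool.not_eq_true] at h
      simp only [h, if_false, Bool.false_and, Bool.false_or]
      rw [ih]
      simp

theorem p_inj {cc : List Char} {a b : Char} (ha : ([a] == cc) = true) (hb : ([b] == cc) = true) :
    a = b := by
  have ha' : [a] = cc := by simpa using ha
  have hb' : [b] = cc := by simpa using hb
  have := ha'.trans hb'.symm
  simpa using this

theorem pairAny_append (p : Char → Bool) (xs : List Char) (x : Char) :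
    pairAny p (xs ++ [x])
    = (pairAny p xs || (match xs.getLast? with | some m => p m && p x | none => false)) := by
  induction xs with
  | nil => simp [pairAny]
  | cons a t ih =>
    cases t with
    | nil => simp [pairAny]
    | cons b t' =>
      simp only [pairAny, List.cons_append, List.tail_cons, List.zip_cons_cons, List.any_cons] at *
      rw [ih]
      simp [Bool.or_assoc]

-- A's range-scan adjacency equals list-level pairAny on the prefix
theorem anyAdj_range (cs : List Char) (cc : List Char) (n : Nat) (hn : n ≤ cs.length) :
    (PySem.List.pyRange 0 (n:Int) 1).any
      (fun i => ([PySem.List.pyGetD cs i ' '] == cc) &&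
        (decide ((0:Int) < i) && ([PySem.List.pyGetD cs (i-1) ' '] == cc)))
    = pairAny (fun a => [a] == cc) (cs.take n) := by
  induction n with
  | zero => simp [PySem.List.pyRange_one_eq_nil, pairAny]
  | succ m ih =>
    have hm : m ≤ cs.length := Nat.le_of_succ_le hn
    have hmlt : m < cs.length := hn
    have hcast : ((m+1 : Nat) : Int) = (m:Int) + 1 := by push_cast; ring
    rw [hcast, PySem.List.pyRange_one_succ_right (by positivity), List.any_append, ih hm]
    have htake : cs.take (m+1) = cs.take m ++ [cs[m]] := by
      rw [List.take_succ]
      simp [List.getElem?_eq_getElem hmlt]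
    rw [htake, pairAny_append]
    congr 1
    simp only [List.any_cons, List.any_nil, Bool.or_false]
    have hget : PySem.List.pyGetD cs ((m:Int)) ' ' = cs[m] := by
      rw [PySem.List.pyGetD_natCast]
      simp [List.getD_eq_getElem?_getD, List.getElem?_eq_getElem hmlt]
    rw [hget]
    cases m with
    | zero => simp
    | succ k =>
      have hk : k < cs.length := by omega
      have hcast2 : ((k+1 : Nat) : Int) - 1 = ((k : Nat) : Int) := by push_cast; ring
      have hget2 : PySem.List.pyGetD cs (((k+1:Nat)):Int) ' ' = cs[k+1] := hget
      have hget3 : PySem.List.pyGetD cs (((k+1:Nat):Int) - 1) ' ' = cs[k] := by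
        rw [hcast2, PySem.List.pyGetD_natCast]
        simp [List.getD_eq_getElem?_getD, List.getElem?_eq_getElem hk]
      rw [hget3]
      have hlast : (cs.take (k+1)).getLast? = some cs[k] := by
        rw [List.getLast?_eq_getElem?]
        have hlen : (cs.take (k+1)).length = k + 1 := by
          simpa using Nat.min_eq_left (by omega : k + 1 ≤ cs.length)
        rw [hlen]
        simp [List.getElem?_take, List.getElem?_eq_getElem hk]
      rw [hlast]
      simp only [decide_eq_true_eq]
      have : (decide ((0:Int) < ((k+1:Nat):Int))) = true := by
        simp
      rw [this]
      simp [Bool.and_comm, Bool.and_assoc, Bool.and_left_comm]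

-- countP over the index range equals countP over the list
theorem countP_range (cs : List Char) (cc : List Char) :
    (PySem.List.pyRange 0 ((cs.length : Int)) 1).countP
      (fun i => [PySem.List.pyGetD cs i ' '] == cc)
    = cs.countP (fun a => [a] == cc) := by
  have hmap := PySem.List.map_pyGetD_pyRange_zero' cs ' '
  calc (PySem.List.pyRange 0 ((cs.length : Int)) 1).countP
        (fun i => [PySem.List.pyGetD cs i ' '] == cc)
      = ((PySem.List.pyRange 0 ((cs.length : Int)) 1).map
          (fun i => PySem.List.pyGetD cs i ' ')).countP (fun a => [a] == cc) := by
        rw [List.countP_map]; rfl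
    _ = cs.countP (fun a => [a] == cc) := by rw [hmap]

-- every element of takeWhile (· == c) equals c
theorem takeWhile_all_eq (c : Char) (cs : List Char) :
    ∀ x ∈ cs.takeWhile (· == c), x = c := by
  intro x hx
  have := List.mem_takeWhile_imp hx
  simpa using this

-- B's count over the runs equals countP over the list
theorem count_rle (cc : List Char) (l : List Char) (a : Int) :
    (rle l).foldl (fun a q => if [q.1] == cc then a + q.2 else a) a
    = a + (l.countP (fun x => [x] == cc) : Int) := by
  induction l using rle.induct generalizing a with
  | case1 => simp [rle]
  | case2 c cs ih =>
    rw [rle]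
    simp only [List.foldl_cons]
    rw [ih]
    have hsplit : c :: cs = [c] ++ cs.takeWhile (· == c) ++ cs.dropWhile (· == c) := by
      simp [List.takeWhile_append_dropWhile]
    rw [hsplit]
    simp only [List.countP_append]
    have htw : (cs.takeWhile (· == c)).countP (fun x => [x] == cc)
        = if [c] == cc then (cs.takeWhile (· == c)).length else 0 := by
      by_cases hc : ([c] == cc) = true
      · rw [if_pos hc, List.countP_eq_length]
        intro x hx
        rw [takeWhile_all_eq c cs x hx]
        exact hc
      · rw [if_neg hc, List.countP_eq_zero]
        intro x hx
        rw [takeWhile_all_eq c cs x hx]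
        simpa using hc
    by_cases hc : ([c] == cc) = true
    · simp only [hc, if_pos, htw, List.countP_singleton, if_true]
      push_cast
      ring
    · simp only [Bool.not_eq_true] at hc
      simp only [hc, htw, List.countP_singleton]
      simp [hc]

theorem head_dropWhile_ne (c : Char) (cs : List Char) (h : Char)
    (hh : (cs.dropWhile (· == c)).head? = some h) : h ≠ c := by
  induction cs with
  | nil => simp at hh
  | cons a t ih =>
    by_cases ha : (a == c) = true
    · rw [List.dropWhile_cons, if_pos ha] at hh
      exact ih hh
    · rw [List.dropWhile_cons, if_neg ha] at hh
      simp only [List.head?_cons, Option.some.injEq] at hh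
      subst hh
      simpa using ha

-- pairAny across a run boundary: first char c, rest d starting with a char ≠ c
theorem pairAny_cons_run (cc : List Char) (c : Char) (t d : List Char)
    (ht : ∀ x ∈ t, x = c) (hd : ∀ h, d.head? = some h → h ≠ c) :
    pairAny (fun a => [a] == cc) (c :: (t ++ d))
    = ((([c] == cc) && !t.isEmpty) || pairAny (fun a => [a] == cc) d) := by
  induction t with
  | nil =>
    cases d with
    | nil => simp [pairAny]
    | cons h d' =>
      have hne : h ≠ c := hd h rfl
      simp only [List.nil_append, pairAny, List.tail_cons, List.zip_cons_cons, List.any_cons]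
      have : (([c] == cc) && ([h] == cc)) = false := by
        by_cases h1 : ([c] == cc) = true
        · by_cases h2 : ([h] == cc) = true
          · exact absurd (p_inj h2 h1) hne
          · simp [h2]
        · simp [h1]
      simp [this]
  | cons x t' ih =>
    have hx : x = c := ht x (List.mem_cons_self)
    subst hx
    have ht' : ∀ y ∈ t', y = x := fun y hy => ht y (List.mem_cons_of_mem _ hy)
    simp only [List.cons_append, pairAny, List.tail_cons, List.zip_cons_cons, List.any_cons] at *
    rw [ih ht']
    by_cases h1 : ([x] == cc) = true
    · simp [h1]
    · simp only [Bool.not_eq_true] at h1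
      simp [h1]

-- B's run adjacency equals pairAny on the list
theorem pairAny_rle (cc : List Char) (l : List Char) :
    pairAny (fun a => [a] == cc) l
    = (rle l).any (fun q => [q.1] == cc && decide ((2:Int) ≤ q.2)) := by
  induction l using rle.induct with
  | case1 => simp [rle, pairAny]
  | case2 c cs ih =>
    rw [rle]
    simp only [List.any_cons]
    rw [← ih]
    have hsplit : c :: cs = c :: (cs.takeWhile (· == c) ++ cs.dropWhile (· == c)) := by
      simp [List.takeWhile_append_dropWhile]
    rw [hsplit, pairAny_cons_run cc c _ _ (takeWhile_all_eq c cs)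
      (fun h hh => head_dropWhile_ne c cs h hh)]
    congr 1
    by_cases hc : ([c] == cc) = true
    · simp only [hc, Bool.true_and]
      rcases hE : cs.takeWhile (· == c) with _ | ⟨y, ys⟩
      · simp
      · simp only [List.isEmpty_cons, Bool.not_false]
        have h2 : ((2:Int) ≤ 1 + (((ys.length : Int)) + 1)) := by omega
        simp [h2]
    · simp only [Bool.not_eq_true] at hc
      simp [hc]

-- ===== VERDICT (by name: the statement is the Claim_ definition above) =====
theorem same_adjacent_spec : Claim_equal_same_adjacent := by
  intro str char _
  unfold Spec_same_adjacent same_adjacent same_adjacent_alt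
  simp only [PySem.Str.len_eq]
  rw [foldA]
  rw [anyAdj_range str.toList char.toList str.toList.length (le_refl _)]
  simp only [List.take_length, Bool.false_or, zero_add]
  rw [countP_range, pairAny_rle, count_rle]
  simp
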